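/- GENERATED by farm/mkstatement.py from design/units.tsv (unit `draw_line`) and the Specs of Vorbis/Spec/*.lean — do not edit.
   THE STATEMENT of the proof unit `draw_line`: the function `draw_line` (93 instructions) satisfies its contract,
   given the contracts of its callees. What the names mean: Vorbis/Spec/Basic.lean. The theorem to prove:
   `theorem draw_line_ok : Vorbis.Spec.draw_line.Statement`. -/
import Vorbis.Spec.LibcMisc
import Vorbis.Spec.PacketRest
namespace Vorbis.Spec.draw_line
open X86 X86.User Asan

/-- The statement of unit `draw_line`. -/
def Statement : Prop :=
  ∀ (Lay : Layout) (_hLay : Lay.hi = 0x1000000) (μ : Microarch) (_hμ : UserX.MicroOK μ) (u₀ : State)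
    (_hcode : HasCodeNat Lay u₀ Vorbis.L.draw_line.entry Vorbis.Code.code_draw_line.nat Vorbis.L.draw_line.size)
    (_h_abs : ∀ (others : List Obj) (frames : List (Nat × FrameLayout)), Calls Lay μ Vorbis.WayInv (Vorbis.conv u₀) Vorbis.L.abs.entry (Vorbis.Spec.abs.spec others frames))
    (_h_asan_load4_noabort : Asan.SmallCheck Lay μ Vorbis.WayInv (Vorbis.CodeOK u₀) [.rax, .rcx, .rdx] 4 Vorbis.L.__asan_load4_noabort.entry),
    ∀ (others : List Obj) (frames : List (Nat × FrameLayout)), Calls Lay μ Vorbis.WayInv (Vorbis.conv u₀) Vorbis.L.draw_line.entry (Vorbis.Spec.draw_line.spec others frames)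

end Vorbis.Spec.draw_line
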